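-- pv_equiv track=rewrite | github.com/THUSI-Lab/GameVerse | src/game_servers/snake/game/logic.py | initialize_game_coords
-- ===== SOURCE A (Python) =====
-- from typing import List, Tuple, Optional
--
-- def initialize_game_coords(
--     board_size: int,
--     snake: List[Tuple[int, int]],
--     obstacles: List[Tuple[int, int]]
-- ) -> List[Tuple[int, int]]:
--     """
--     Initialize the list of available coordinates for food spawning.
--
--     Args:
--         board_size: Size of the game board
--         snake: Initial snake positions
--         obstacles: List of obstacle positions
--
--     Returns:
--         List of available coordinates (excluding snake, obstacles, and borders)
--     """
--     coords = [
--         (x, y)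
--         for x in range(1, board_size - 1)
--         for y in range(1, board_size - 1)
--     ]
--
--     # Remove snake positions
--     for pos in snake:
--         if pos in coords:
--             coords.remove(pos)
--
--     # Remove obstacle positions
--     for pos in obstacles:
--         if pos in coords:
--             coords.remove(pos)
--
--     return coords
-- ===== SOURCE B (Python) =====
-- def initialize_game_coords(board_size, snake, obstacles):
--     # Group blocked cells by row once, then emit the interior grid row by row,
--     # skipping the blocked columns of each row.
--     rows = {}
--     for x, y in snake:
--         rows.setdefault(x, []).append(y)
--     for x, y in obstacles:
--         rows.setdefault(x, []).append(y)
--     coords = []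
--     for x in range(1, board_size - 1):
--         bad = rows.get(x, ())
--         for y in range(1, board_size - 1):
--             if y not in bad:
--                 coords.append((x, y))
--     return coords
-- ===== Notes on version B (the rewrite author's own statement) =====
-- stated objective: alternative
-- what changed: Replaces A's build-then-scan-and-remove loops (each 'pos in coords'/'coords.remove' scans the whole grid list) with a row-indexed grouping: a dict mapping row x to its blocked columns is built once from snake and obstacles, and the grid is emitted row by row skipping that row's blocked columns, so no pass over the grid list ever searches for a position.
import Mathlib
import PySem

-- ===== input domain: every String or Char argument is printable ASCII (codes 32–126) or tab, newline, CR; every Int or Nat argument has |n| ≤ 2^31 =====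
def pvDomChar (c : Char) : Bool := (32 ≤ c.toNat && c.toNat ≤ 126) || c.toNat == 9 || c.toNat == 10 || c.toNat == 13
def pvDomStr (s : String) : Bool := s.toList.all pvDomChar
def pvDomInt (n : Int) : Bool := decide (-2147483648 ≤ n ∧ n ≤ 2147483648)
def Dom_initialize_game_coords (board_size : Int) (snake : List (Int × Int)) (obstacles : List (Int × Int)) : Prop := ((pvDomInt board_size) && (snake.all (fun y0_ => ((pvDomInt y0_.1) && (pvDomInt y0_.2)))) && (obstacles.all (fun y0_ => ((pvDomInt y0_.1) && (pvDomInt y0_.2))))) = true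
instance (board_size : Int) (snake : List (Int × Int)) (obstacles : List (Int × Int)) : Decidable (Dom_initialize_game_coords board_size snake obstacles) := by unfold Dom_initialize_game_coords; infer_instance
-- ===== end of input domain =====

-- B groups the blocked cells by row in a dict built once and emits the grid row by row skipping that row's blocked columns, replacing A's scan-and-remove passes over the grid list; a different algorithm of similar size.


-- ===== PORT A =====
-- coords = [(x, y) for x in range(1, board_size-1) for y in range(1, board_size-1)]
-- then 'for pos in snake: if pos in coords: coords.remove(pos)', same for obstacles.
def initialize_game_coords (board_size : Int) (snake : List (Int × Int)) (obstacles : List (Int × Int)) : List (Int × Int) :=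
  let coords : List (Int × Int) :=
    (PySem.List.pyRange 1 (board_size - 1) 1).flatMap
      (fun x => (PySem.List.pyRange 1 (board_size - 1) 1).map (fun y => (x, y)))
  let coords := snake.foldl
    (fun cs pos => if cs.contains pos then (PySem.List.remove? cs pos).getD cs else cs) coords
  let coords := obstacles.foldl
    (fun cs pos => if cs.contains pos then (PySem.List.remove? cs pos).getD cs else cs) coords
  coords

-- ===== PORT B =====
-- rows = {}; for x, y in snake: rows.setdefault(x, []).append(y); same loop for obstacles
--   ('rows.setdefault(x, []).append(y)' is 'rows[x] = rows.get(x, []) + [y]' with the same key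
--    position and value: ported as Dict.modify, which is exactly that.)
-- coords = []; for x in range(1, board_size-1): bad = rows.get(x, ());
--   for y in range(1, board_size-1): if y not in bad: coords.append((x, y))
--   (the default '()' is an empty sequence: ported as the empty list)
def initialize_game_coords_alt (board_size : Int) (snake : List (Int × Int)) (obstacles : List (Int × Int)) : List (Int × Int) :=
  let rows : PySem.Dict Int (List Int) :=
    snake.foldl (fun d p => d.modify p.1 [] (· ++ [p.2])) PySem.Dict.empty
  let rows := obstacles.foldl (fun d p => d.modify p.1 [] (· ++ [p.2])) rows
  (PySem.List.pyRange 1 (board_size - 1) 1).foldl (fun coords x =>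
    let bad := rows.getD x []
    (PySem.List.pyRange 1 (board_size - 1) 1).foldl (fun coords y =>
      if bad.contains y then coords else coords ++ [(x, y)]) coords) []

-- ===== PRECONDITION & SPEC =====
def Spec_initialize_game_coords (board_size : Int) (snake : List (Int × Int)) (obstacles : List (Int × Int)) (out : List (Int × Int)) : Prop := out = initialize_game_coords_alt board_size snake obstacles
instance (board_size : Int) (snake : List (Int × Int)) (obstacles : List (Int × Int)) (out : List (Int × Int)) : Decidable (Spec_initialize_game_coords board_size snake obstacles out) := by unfold Spec_initialize_game_coords; infer_instance

-- ===== CLAIM (what is proved, stated in full; the proofs are below) =====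
def Claim_equal_initialize_game_coords : Prop := ∀ (board_size : Int) (snake : List (Int × Int)) (obstacles : List (Int × Int)), Dom_initialize_game_coords board_size snake obstacles → Spec_initialize_game_coords board_size snake obstacles (initialize_game_coords board_size snake obstacles)

-- ===== LEMMAS AND PROOFS =====

-- strict lexicographic order on pairs (first components, then second components)
def pvLexLt (p q : Int × Int) : Prop := p.1 < q.1 ∨ (p.1 = q.1 ∧ p.2 < q.2)

-- the interior grid list of A's comprehension
def pvGrid (board_size : Int) : List (Int × Int) :=
  (PySem.List.pyRange 1 (board_size - 1) 1).flatMap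
    (fun x => (PySem.List.pyRange 1 (board_size - 1) 1).map (fun y => (x, y)))

lemma pvGrid_pairwise (board_size : Int) : (pvGrid board_size).Pairwise pvLexLt := by
  unfold pvGrid
  rw [List.pairwise_flatMap]
  constructor
  · intro a _
    rw [List.pairwise_map]
    exact (PySem.List.pairwise_lt_pyRange_one 1 (board_size - 1)).imp
      (fun h => Or.inr ⟨rfl, h⟩)
  · exact (PySem.List.pairwise_lt_pyRange_one 1 (board_size - 1)).imp
      (fun h x hx y hy => by
        obtain ⟨_, _, rfl⟩ := List.mem_map.mp hx
        obtain ⟨_, _, rfl⟩ := List.mem_map.mp hy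
        exact Or.inl h)

lemma pvGrid_nodup (board_size : Int) : (pvGrid board_size).Nodup := by
  refine (pvGrid_pairwise board_size).imp ?_
  rintro ⟨a, b⟩ ⟨c, d⟩ h heq
  cases heq
  rcases h with h | ⟨_, h⟩ <;> omega

-- A's removal loop over a duplicate-free list is a filter
lemma pvRemoveLoop (ps : List (Int × Int)) (cs : List (Int × Int)) (h : cs.Nodup) :
    ps.foldl (fun cs pos => if cs.contains pos then (PySem.List.remove? cs pos).getD cs else cs) cs
      = cs.filter (fun c => !ps.contains c) := by
  induction ps generalizing cs with
  | nil => simp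
  | cons p ps ih =>
    rw [List.foldl_cons]
    by_cases hp : p ∈ cs
    · have hc : cs.contains p = true := by simpa using hp
      rw [if_pos hc, PySem.List.remove?_eq_some_erase cs p hp, Option.getD_some,
        h.erase_eq_filter, ih _ (h.filter _), List.filter_filter]
      refine List.filter_congr ?_
      intro c _
      by_cases hcp : c = p <;> simp [hcp]
    · have hc : cs.contains p = false := by simpa using hp
      rw [if_neg (by simpa using hp), ih _ h]
      refine List.filter_congr ?_
      intro c hcmem
      have : c ≠ p := fun hcp => hp (hcp ▸ hcmem)
      simp [this]

-- B's grouping dict: row x holds exactly the second components of the blocked pairs with first component x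
lemma pvRowsGetD (snake obstacles : List (Int × Int)) (x : Int) :
    (obstacles.foldl (fun d p => d.modify p.1 [] (· ++ [p.2]))
      (snake.foldl (fun d p => d.modify p.1 [] (· ++ [p.2])) PySem.Dict.empty)).getD x []
      = ((snake ++ obstacles).filter (fun p => p.1 == x)).map (·.2) := by
  rw [PySem.Dict.getD_foldl_modify_append, PySem.Dict.getD_foldl_modify_append,
    PySem.Dict.getD_empty, List.filter_append, List.map_append, List.nil_append]

-- membership in a row's blocked list is membership of the pair in the blocked lists
lemma pvRowContains (l : List (Int × Int)) (x y : Int) :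
    (((l.filter (fun p => p.1 == x)).map (·.2)).contains y) = l.contains (x, y) := by
  simp only [List.contains_eq_mem, decide_eq_decide, List.mem_map, List.mem_filter, beq_iff_eq]
  constructor
  · rintro ⟨⟨a, b⟩, ⟨hm, rfl⟩, rfl⟩
    exact hm
  · intro hm
    exact ⟨(x, y), ⟨hm, rfl⟩, rfl⟩

-- B in closed form: the grid rows, each filtered by the blocked pairs
lemma pvBflat (board_size : Int) (snake obstacles : List (Int × Int)) :
    initialize_game_coords_alt board_size snake obstacles
      = (PySem.List.pyRange 1 (board_size - 1) 1).flatMap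
          (fun x => ((PySem.List.pyRange 1 (board_size - 1) 1).filter
            (fun y => !(snake ++ obstacles).contains (x, y))).map (fun y => (x, y))) := by
  unfold initialize_game_coords_alt
  show (PySem.List.pyRange 1 (board_size - 1) 1).foldl (fun coords x =>
      (PySem.List.pyRange 1 (board_size - 1) 1).foldl (fun coords y =>
        if ((obstacles.foldl (fun d p => d.modify p.1 [] (· ++ [p.2]))
            (snake.foldl (fun d p => d.modify p.1 [] (· ++ [p.2])) PySem.Dict.empty)).getD x
              []).contains y
        then coords else coords ++ [(x, y)]) coords) [] = _
  have hinner : ∀ (x : Int) (acc : List (Int × Int)),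
      (PySem.List.pyRange 1 (board_size - 1) 1).foldl (fun coords y =>
        if ((obstacles.foldl (fun d p => d.modify p.1 [] (· ++ [p.2]))
            (snake.foldl (fun d p => d.modify p.1 [] (· ++ [p.2])) PySem.Dict.empty)).getD x
              []).contains y
        then coords else coords ++ [(x, y)]) acc
      = acc ++ ((PySem.List.pyRange 1 (board_size - 1) 1).filter
          (fun y => !(snake ++ obstacles).contains (x, y))).map (fun y => (x, y)) := by
    intro x acc
    have hcong := PySem.List.foldl_congr_mem
      (l := PySem.List.pyRange 1 (board_size - 1) 1)
      (f := fun coords y =>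
        if ((obstacles.foldl (fun d p => d.modify p.1 [] (· ++ [p.2]))
            (snake.foldl (fun d p => d.modify p.1 [] (· ++ [p.2])) PySem.Dict.empty)).getD x
              []).contains y
        then coords else coords ++ [(x, y)])
      (g := fun coords y =>
        if !(snake ++ obstacles).contains (x, y) then coords ++ [(x, y)] else coords)
      (init := acc) ?_
    · rw [hcong, PySem.List.foldl_append_if]
    · intro a y _
      have hc : ((obstacles.foldl (fun d p => d.modify p.1 [] (· ++ [p.2]))
          (snake.foldl (fun d p => d.modify p.1 [] (· ++ [p.2])) PySem.Dict.empty)).getD x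
            []).contains y = (snake ++ obstacles).contains (x, y) := by
        rw [pvRowsGetD, pvRowContains]
      beta_reduce
      rw [hc]
      cases hb : (snake ++ obstacles).contains (x, y) <;> simp
  have houter := PySem.List.foldl_congr_mem
    (l := PySem.List.pyRange 1 (board_size - 1) 1)
    (f := fun coords x =>
      (PySem.List.pyRange 1 (board_size - 1) 1).foldl (fun coords y =>
        if ((obstacles.foldl (fun d p => d.modify p.1 [] (· ++ [p.2]))
            (snake.foldl (fun d p => d.modify p.1 [] (· ++ [p.2])) PySem.Dict.empty)).getD x
              []).contains y
        then coords else coords ++ [(x, y)]) coords)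
    (g := fun coords x => coords ++ ((PySem.List.pyRange 1 (board_size - 1) 1).filter
        (fun y => !(snake ++ obstacles).contains (x, y))).map (fun y => (x, y)))
    (init := ([] : List (Int × Int))) (fun acc x _ => hinner x acc)
  rw [houter, PySem.List.foldl_append_eq_flatMap, List.nil_append]

-- ===== VERDICT (by name: the statement is the Claim_ definition above) =====
theorem initialize_game_coords_spec : Claim_equal_initialize_game_coords := by
  intro board_size snake obstacles _
  unfold Spec_initialize_game_coords initialize_game_coords
  show obstacles.foldl _ (snake.foldl _ (pvGrid board_size)) = _
  have hgrid := pvGrid_nodup board_size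
  -- A's side: the two removal loops are one filter over the grid
  rw [pvRemoveLoop snake _ hgrid, pvRemoveLoop obstacles _ (hgrid.filter _), List.filter_filter,
    pvBflat]
  -- both sides are flatMaps over the rows
  unfold pvGrid
  rw [List.filter_flatMap]
  refine List.flatMap_congr ?_
  intro x _
  rw [List.filter_map]
  refine congrArg _ (List.filter_congr ?_)
  intro y _
  simp [Function.comp, List.contains_eq_mem, Bool.and_comm]
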